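-- pv_equiv track=rewrite | github.com/sihyun10/Programmers | 백준/Bronze/8958. OX퀴즈/OX퀴즈.py | score_caculator
-- ===== SOURCE A (Python) =====
-- def score_caculator(result):
--   score = 0
--   total_score = 0
--
--   for i in result:
--     if (i == "O"):
--       score += 1
--       total_score += score
--     else:
--       score = 0
--
--   return total_score
-- ===== SOURCE B (Python) =====
-- def score_caculator(result):
--     total = 0
--     i = 0
--     n = len(result)
--     while i < n:
--         if result[i] == "O":
--             j = i
--             while j < n and result[j] == "O":
--                 j += 1
--             k = j - i
--             total += k * (k + 1) // 2
--             i = j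
--         else:
--             i += 1
--     return total
-- ===== Notes on version B (the rewrite author's own statement) =====
-- stated objective: alternative
-- what changed: Replaces A's per-character running counter with run detection: scan to the end of each maximal run of 'O's and add the closed form k*(k+1)//2 for its length, skipping other characters.
import Mathlib
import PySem

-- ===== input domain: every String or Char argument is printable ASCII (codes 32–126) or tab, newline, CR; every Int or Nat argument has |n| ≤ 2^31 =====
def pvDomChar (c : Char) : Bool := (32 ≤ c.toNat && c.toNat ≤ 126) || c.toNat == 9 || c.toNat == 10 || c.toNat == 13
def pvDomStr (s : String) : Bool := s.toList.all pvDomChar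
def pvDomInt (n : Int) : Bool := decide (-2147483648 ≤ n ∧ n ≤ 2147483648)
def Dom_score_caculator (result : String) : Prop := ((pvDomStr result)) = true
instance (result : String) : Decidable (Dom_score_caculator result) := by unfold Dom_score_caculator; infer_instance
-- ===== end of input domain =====

-- B replaces A's per-character running counter with maximal-run detection plus the
-- closed form k*(k+1)//2 per run of 'O's (alternative decomposition; return value only).

-- ===== PORT A =====
-- the for-loop of A over the characters, state (score, total_score)
def pvLoopA : List Char → Int → Int → Int
  | [], _, total => total
  | i :: rest, score, total =>
    if i = 'O' then pvLoopA rest (score + 1) (total + (score + 1))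
    else pvLoopA rest 0 total

def score_caculator (result : String) : Int :=
  pvLoopA result.toList 0 0

-- ===== PORT B =====
-- Source B's inner `while j < n and result[j] == "O"` scan = takeWhile/dropWhile on the
-- remaining characters (exact: advances over the maximal run of 'O's); k*(k+1)//2 on
-- a nonnegative k equals Nat division here.
def pvRunLen (cs : List Char) : Nat := (cs.takeWhile (· = 'O')).length

def pvLoopB : List Char → Int
  | [] => 0
  | c :: cs =>
    if c = 'O' then
      let k : Nat := pvRunLen cs + 1
      (↑(k * (k + 1) / 2) : Int) + pvLoopB (cs.dropWhile (· = 'O'))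
    else pvLoopB cs
termination_by cs => cs.length
decreasing_by
  · exact Nat.lt_succ_of_le (List.length_dropWhile_le _ _)
  · simp

def score_caculator_alt (result : String) : Int :=
  pvLoopB result.toList

-- ===== PRECONDITION & SPEC =====
def Spec_score_caculator (result : String) (out : Int) : Prop := out = score_caculator_alt result
instance (result : String) (out : Int) : Decidable (Spec_score_caculator result out) := by unfold Spec_score_caculator; infer_instance

-- ===== CLAIM (what is proved, stated in full; the proofs are below) =====
def Claim_equal_score_caculator : Prop := ∀ (result : String), Dom_score_caculator result → Spec_score_caculator result (score_caculator result)

-- ===== LEMMAS AND PROOFS =====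

theorem pvTri_succ (n : Nat) : (n + 1) * (n + 2) / 2 = n * (n + 1) / 2 + (n + 1) := by
  have h1 : 2 ∣ n * (n + 1) := Nat.even_mul_succ_self n |>.two_dvd
  have h2 : (n + 1) * (n + 2) = n * (n + 1) + 2 * (n + 1) := by ring
  omega

theorem pvLoopB_O_cons (cs : List Char) :
    pvLoopB ('O' :: cs) = pvLoopB cs + (pvRunLen cs + 1 : Nat) := by
  rw [pvLoopB]
  simp only [reduceIte]
  cases cs with
  | nil => simp [pvLoopB, pvRunLen]
  | cons c cs' =>
    by_cases hc : c = 'O'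
    · subst hc
      rw [pvLoopB]
      simp only [reduceIte]
      have hrun : pvRunLen ('O' :: cs') = pvRunLen cs' + 1 := by
        simp [pvRunLen, List.takeWhile]
      have hdrop : ('O' :: cs').dropWhile (· = 'O') = cs'.dropWhile (· = 'O') := by
        simp [List.dropWhile]
      rw [hrun, hdrop]
      generalize pvRunLen cs' = k
      have e1 : (k + 1 + 1) * (k + 1 + 1 + 1) / 2 = (k + 1) * (k + 1 + 1) / 2 + (k + 1 + 1) := by
        rw [show k + 1 + 1 + 1 = (k + 1) + 2 by omega, show k + 1 + 1 = (k + 1) + 1 by omega]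
        exact pvTri_succ (k + 1)
      rw [e1]
      push_cast
      ring
    · have hrun : pvRunLen (c :: cs') = 0 := by
        simp [pvRunLen, List.takeWhile, hc]
      have hdrop : (c :: cs').dropWhile (· = 'O') = c :: cs' := by
        simp [List.dropWhile, hc]
      rw [hrun, hdrop]
      norm_num
      omega

theorem pvLoopA_eq (cs : List Char) :
    ∀ (score total : Int), pvLoopA cs score total = total + pvLoopB cs + score * (pvRunLen cs : Nat) := by
  induction cs with
  | nil => intro score total; simp [pvLoopA, pvLoopB, pvRunLen]
  | cons c cs ih =>
    intro score total
    by_cases hc : c = 'O'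
    · subst hc
      rw [pvLoopA, if_pos rfl, ih, pvLoopB_O_cons]
      have hrun : pvRunLen ('O' :: cs) = pvRunLen cs + 1 := by
        simp [pvRunLen, List.takeWhile]
      rw [hrun]
      push_cast
      ring
    · rw [pvLoopA, if_neg hc, ih]
      have hrun : pvRunLen (c :: cs) = 0 := by
        simp [pvRunLen, List.takeWhile, hc]
      have hB : pvLoopB (c :: cs) = pvLoopB cs := by
        rw [pvLoopB, if_neg hc]
      rw [hrun, hB]
      push_cast
      ring

-- ===== VERDICT (by name: the statement is the Claim_ definition above) =====
theorem score_caculator_spec : Claim_equal_score_caculator := by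
  intro result _
  unfold Spec_score_caculator score_caculator score_caculator_alt
  rw [pvLoopA_eq]
  ring
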